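-- pv_equiv track=rewrite | github.com/DMChernowitz/Free-Fermionic-Hilbert-Search | ffstate.py | boxicles
-- ===== SOURCE A (Python) =====
-- def boxicles(n,depths): #puts n particles in boxes with maximal capacity deps. oo=None was last input
--     M = len(depths)
--     if n == 0:
--         yield [0 for _ in range(M)]
--     else:
--         for preput in boxicles(n-1,depths):
--             for k in range(M):
--                 #postput = [a for a in preput]
--                 #postput[k] += 1
--                 #yield postput
--                 if preput[k]<depths[k]:
--                     yield [preput[a]+int(a==k) for a in range(M)]
--                 if preput[k]:
--                     break
-- ===== SOURCE B (Python) =====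
-- def boxicles(n, depths):
--     # Recursion over boxes (last box first) instead of over the particle count:
--     # for each count v of the last box (ascending, capped), recursively
--     # distribute the remainder over the earlier boxes. Reproduces A's colex
--     # yield order with no break/dedup trick.
--     def rec(rds, rem):
--         if not rds:
--             if rem == 0:
--                 yield []
--             return
--         cap = min(rds[0], rem)
--         if cap < 0:
--             cap = 0
--         for v in range(cap + 1):
--             for rest in rec(rds[1:], rem - v):
--                 yield rest + [v]
--     yield from rec(depths[::-1], n)
-- ===== Notes on version B (the rewrite author's own statement) =====
-- stated objective: simpler
-- what changed: Replaces A's level-by-level regeneration (each distribution of n built by re-enumerating all distributions of n-1 and incrementing up to the first occupied box, with a break to avoid duplicates) by a direct recursion over boxes: choose the last box's count ascending (capped) and recurse on the remainder, yielding each distribution exactly once in the same colex order.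
import Mathlib
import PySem

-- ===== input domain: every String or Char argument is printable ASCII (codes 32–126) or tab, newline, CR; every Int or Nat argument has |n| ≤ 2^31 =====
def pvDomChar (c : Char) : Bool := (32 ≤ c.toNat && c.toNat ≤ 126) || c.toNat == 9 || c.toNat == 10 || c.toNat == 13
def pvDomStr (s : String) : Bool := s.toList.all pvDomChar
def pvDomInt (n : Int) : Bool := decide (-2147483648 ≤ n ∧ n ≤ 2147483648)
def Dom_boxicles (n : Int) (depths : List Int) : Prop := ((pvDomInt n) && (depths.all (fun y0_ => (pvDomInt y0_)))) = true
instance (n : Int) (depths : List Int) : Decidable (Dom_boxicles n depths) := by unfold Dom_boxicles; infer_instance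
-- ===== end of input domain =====

-- B replaces A's level-by-level regeneration (with a break-based dedup) by a direct
-- recursion over boxes, last box first, same colex yield order: simpler, no dedup trick.

-- ===== PORT A =====
-- the inner 'for k in range(M): if preput[k]<depths[k]: yield …; if preput[k]: break'
-- loop as the obvious structural recursion over preput and depths in parallel
-- (A only ever calls it with len(preput) == len(depths))
def innerA : List Int → List Int → List (List Int)
  | [], _ => []
  | _, [] => []
  | p :: ps, d :: ds =>
      let here := if p < d then [(p + 1) :: ps] else []
      if p ≠ 0 then here else here ++ (innerA ps ds).map (p :: ·)

def boxA : Nat → List Int → List (List Int)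
  | 0, depths => [depths.map (fun _ => (0 : Int))]
  | m + 1, depths => (boxA m depths).flatMap (fun pre => innerA pre depths)

def boxicles (n : Int) (depths : List Int) : List (List Int) :=
  boxA n.toNat depths   -- recursion on n; n < 0 (Python: infinite recursion) is outside Pre_

-- ===== PORT B =====
def recB : List Int → Int → List (List Int)
  | [], rem => if rem = 0 then [[]] else []
  | d :: rds, rem =>
      let cap0 := min d rem
      let cap := if cap0 < 0 then 0 else cap0
      (PySem.List.pyRange 0 (cap + 1) 1).flatMap (fun v =>
        (recB rds (rem - v)).map (· ++ [v]))

def boxicles_alt (n : Int) (depths : List Int) : List (List Int) :=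
  recB depths.reverse n

-- ===== PRECONDITION & SPEC =====
-- for n < 0 the Python A recurses with no base case (RecursionError); those inputs are excluded
def Pre_boxicles (n : Int) (depths : List Int) : Prop := 0 ≤ n
instance (n : Int) (depths : List Int) : Decidable (Pre_boxicles n depths) := by
  unfold Pre_boxicles; infer_instance
def pvWitness_boxicles : Int × List Int := (2, [1, 2, 2])

def Spec_boxicles (n : Int) (depths : List Int) (out : List (List Int)) : Prop :=
  out = boxicles_alt n depths
instance (n : Int) (depths : List Int) (out : List (List Int)) : Decidable (Spec_boxicles n depths out) := by
  unfold Spec_boxicles; infer_instance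

-- ===== CLAIM (what is proved, stated in full; the proofs are below) =====
def Claim_equal_boxicles : Prop := ∀ (n : Int) (depths : List Int), Dom_boxicles n depths → Pre_boxicles n depths → Spec_boxicles n depths (boxicles n depths)
-- ===== LEMMAS AND PROOFS =====
theorem recB_zero (rds : List Int) : recB rds 0 = [List.replicate rds.length 0] := by
  induction rds with
  | nil => simp [recB]
  | cons d rds ih =>
      simp only [recB]
      have hcap : (if min d 0 < 0 then (0:Int) else min d 0) = 0 := by omega
      rw [hcap]
      rw [PySem.List.pyRange_one]
      norm_num [ih, List.replicate_succ']
theorem recB_length {rds : List Int} : ∀ {r : Int} {xs : List Int}, xs ∈ recB rds r →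
    xs.length = rds.length := by
  induction rds with
  | nil => intro r xs h; simp [recB] at h; simp_all
  | cons d rds ih =>
      intro r xs h
      simp only [recB, List.mem_flatMap, List.mem_map] at h
      obtain ⟨v, -, rest, hrest, rfl⟩ := h
      simp [ih hrest]

theorem recB_sum {rds : List Int} : ∀ {r : Int} {xs : List Int}, xs ∈ recB rds r →
    xs.sum = r := by
  induction rds with
  | nil => intro r xs h; simp [recB] at h; simp_all
  | cons d rds ih =>
      intro r xs h
      simp only [recB, List.mem_flatMap, List.mem_map] at h
      obtain ⟨v, -, rest, hrest, rfl⟩ := h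
      simp [ih hrest]

theorem recB_allzero {rds : List Int} {r : Int} {xs : List Int} (h : xs ∈ recB rds r) :
    ((∀ x ∈ xs, x = 0) ↔ r = 0) := by
  constructor
  · intro hz
    have := recB_sum h
    rw [List.sum_eq_zero hz] at this
    omega
  · rintro rfl
    rw [recB_zero] at h
    simp at h
    subst h
    simp
theorem innerA_snoc (v d : Int) (ds2 : List Int) :
    ∀ (xs ds1 : List Int), xs.length = ds1.length →
    innerA (xs ++ [v]) (ds1 ++ d :: ds2) =
      (innerA xs ds1).map (· ++ [v]) ++
        (if ∀ x ∈ xs, x = 0 then (if v < d then [xs ++ [v + 1]] else []) else []) := by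
  intro xs
  induction xs with
  | nil =>
      intro ds1 h
      have : ds1 = [] := by simpa using h.symm
      subst this
      simp [innerA]
  | cons p ps ih =>
      intro ds1 h
      cases ds1 with
      | nil => simp at h
      | cons e es =>
          simp only [List.length_cons, Nat.add_right_cancel_iff] at h
          simp only [List.cons_append, innerA]
          by_cases hp : p = 0
          · subst hp
            simp only [ne_eq, not_true_eq_false, if_false]
            rw [ih es h]
            have hiff : (∀ x ∈ (0:Int) :: ps, x = 0) ↔ (∀ x ∈ ps, x = 0) := by simp
            by_cases hz : ∀ x ∈ ps, x = 0
            · rw [if_pos hz, if_pos (hiff.2 hz)]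
              split_ifs with h1 <;> simp [List.map_map, Function.comp]
            · rw [if_neg hz, if_neg (fun hc => hz (hiff.1 hc))]
              split_ifs with h1 <;> simp [Function.comp_def]
          · have hz' : ¬ ∀ x ∈ p :: ps, x = 0 := fun hc => hp (hc p List.mem_cons_self)
            simp only [ne_eq, hp, not_false_eq_true, if_true, hz', if_false]
            split_ifs with h1 <;> simp
theorem step_recB : ∀ (rds : List Int) (r : Int), 0 ≤ r →
    (recB rds r).flatMap (fun pre => innerA pre rds.reverse) = recB rds (r + 1) := by
  intro rds
  induction rds with
  | nil =>
      intro r hr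
      by_cases h : r = 0 <;> simp [recB, innerA, h]; omega
  | cons d rds ih =>
      intro r hr
      have hrev : (d :: rds).reverse = rds.reverse ++ [d] := by simp
      -- closed form of one v-block
      have hblock : ∀ v : Int, 0 ≤ v → v ≤ r →
          ((recB rds (r - v)).map (· ++ [v])).flatMap (fun pre => innerA pre (rds.reverse ++ [d]))
          = (recB rds (r - v + 1)).map (· ++ [v]) ++
              (if r - v = 0 ∧ v < d then [List.replicate rds.length 0 ++ [v + 1]] else []) := by
        intro v hv0 hvr
        rw [List.flatMap_map]
        have hsnoc : ∀ rest ∈ recB rds (r - v),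
            innerA (rest ++ [v]) (rds.reverse ++ [d]) =
              (innerA rest rds.reverse).map (· ++ [v]) ++
                (if r - v = 0 ∧ v < d then [rest ++ [v + 1]] else []) := by
          intro rest hrest
          have hlen : rest.length = rds.reverse.length := by
            simpa using recB_length hrest
          rw [innerA_snoc v d [] rest rds.reverse hlen]
          congr 1
          by_cases hz : r - v = 0
          · rw [if_pos ((recB_allzero hrest).2 hz)]
            simp [hz]
          · rw [if_neg (fun hc => hz ((recB_allzero hrest).1 hc))]
            simp [hz]
        rw [List.flatMap_congr hsnoc]
        by_cases hz : r - v = 0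
        · -- the singleton all-zero predecessor: unfold directly
          rw [hz] at *
          rw [recB_zero]
          have h1 : recB rds (0 + 1) =
              (innerA (List.replicate rds.length 0) rds.reverse) := by
            have := ih 0 le_rfl
            rw [recB_zero] at this
            simpa using this.symm
          simp only [List.flatMap_cons, List.flatMap_nil, List.append_nil, h1]
        · have hcond : ¬ (r - v = 0 ∧ v < d) := fun hc => hz hc.1
          rw [if_neg hcond]
          simp only [List.append_nil]
          have : (recB rds (r - v)).flatMap
              (fun rest => (innerA rest rds.reverse).map (· ++ [v]) ++
                (if r - v = 0 ∧ v < d then [rest ++ [v + 1]] else [])) =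
              (recB rds (r - v)).flatMap
              (fun rest => (innerA rest rds.reverse).map (· ++ [v])) := by
            apply List.flatMap_congr; intro rest _; rw [if_neg hcond]; simp
          rw [this, ← List.map_flatMap, ih (r - v) (by omega)]
      -- outer assembly
      simp only [recB, hrev]
      rw [List.flatMap_assoc]
      have hcongr : ∀ v ∈ PySem.List.pyRange 0 ((if min d r < 0 then (0:Int) else min d r) + 1) 1,
          ((recB rds (r - v)).map (· ++ [v])).flatMap (fun pre => innerA pre (rds.reverse ++ [d]))
          = (recB rds (r + 1 - v)).map (· ++ [v]) ++
              (if r - v = 0 ∧ v < d then [List.replicate rds.length 0 ++ [v + 1]] else []) := by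
        intro v hv
        rw [PySem.List.mem_pyRange_one] at hv
        have hvr : v ≤ r := by omega
        rw [hblock v hv.1 hvr]
        have h2 : r - v + 1 = r + 1 - v := by omega
        rw [h2]
      rw [List.flatMap_congr hcongr]
      by_cases hdr : d ≤ r
      · have hcap : (if min d (r+1) < 0 then (0:Int) else min d (r+1)) = (if min d r < 0 then (0:Int) else min d r) := by omega
        rw [hcap]
        apply List.flatMap_congr
        intro v hv
        rw [PySem.List.mem_pyRange_one] at hv
        have hcond : ¬ (r - v = 0 ∧ v < d) := by omega
        rw [if_neg hcond, List.append_nil]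
      · have hcapr : (if min d r < 0 then (0:Int) else min d r) = r := by omega
        have hcapr1 : (if min d (r+1) < 0 then (0:Int) else min d (r+1)) = r + 1 := by omega
        rw [hcapr, hcapr1]
        rw [PySem.List.pyRange_one_succ_right (by omega : (0:Int) ≤ r + 1),
            PySem.List.pyRange_one_succ_right (by omega : (0:Int) ≤ r)]
        rw [List.flatMap_append, List.flatMap_append, List.flatMap_append]
        have hz : ∀ v ∈ PySem.List.pyRange 0 r 1,
            (recB rds (r + 1 - v)).map (· ++ [v]) ++
              (if r - v = 0 ∧ v < d then [List.replicate rds.length 0 ++ [v + 1]] else [])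
            = (recB rds (r + 1 - v)).map (· ++ [v]) := by
          intro v hv
          rw [PySem.List.mem_pyRange_one] at hv
          have hcond : ¬ (r - v = 0 ∧ v < d) := by omega
          rw [if_neg hcond, List.append_nil]
        rw [List.flatMap_congr hz]
        have hcond2 : (r - r = 0 ∧ r < d) := by omega
        simp only [List.flatMap_cons, List.flatMap_nil, List.append_nil, if_pos hcond2]
        rw [show r + 1 - (r + 1) = (0:Int) by omega, recB_zero]
        simp [List.append_assoc]
theorem boxA_eq_recB (m : Nat) (depths : List Int) :
    boxA m depths = recB depths.reverse (m : Int) := by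
  induction m with
  | zero =>
      simp only [boxA, Nat.cast_zero, recB_zero, List.length_reverse]
      congr 1
      exact List.map_const'
  | succ m ih =>
      have hstep := step_recB depths.reverse (m : Int) (by positivity)
      rw [List.reverse_reverse] at hstep
      have hc : ((m + 1 : Nat) : Int) = (m : Int) + 1 := by push_cast; ring
      simp only [boxA, ih, hc, hstep]

-- ===== VERDICT (by name: the statement is the Claim_ definition above) =====
theorem boxicles_spec : Claim_equal_boxicles := by
  intro n depths _ hpre
  unfold Spec_boxicles boxicles boxicles_alt
  have h : ((n.toNat : Int)) = n := Int.toNat_of_nonneg hpre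
  rw [boxA_eq_recB, h]
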